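-- pv_equiv track=rewrite | github.com/artemwoka/Try-Error | task3.py | first_vacant_row
-- ===== SOURCE A (Python) =====
-- def first_vacant_row(seats):
--     """Повернути перший ряд, в якому є найбільше
--     вільних місць та їх кількість.
--
--     Повертається нумерація рядів із 1. Якщо вільних місць немає, повернути 0, 0.
--
--     Параметры:
--         - seats (list of list): інформація про продані квитки
--                                 (1 - продано, 0 - ні).
--
--     Результат:
--         - tuple (ряд, кількість місць).
--     """
--     max_count = 0
--     max_row = 0
--     for row_index, row in enumerate(seats):
--         available_seats_count = row.count(0)  # 0 - пусто
--         if available_seats_count > max_count: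
--             max_count = available_seats_count
--             max_row = row_index + 1  # нумерація рядів із 1
--
--     return max_row, max_count
-- ===== SOURCE B (Python) =====
-- def first_vacant_row(seats):
--     counts = [row.count(0) for row in seats]
--     best = max(counts, default=0)
--     if best == 0:
--         return 0, 0
--     return counts.index(best) + 1, best
-- ===== Notes on version B (the rewrite author's own statement) =====
-- stated objective: simpler
-- what changed: Replaces the single running-max loop with strict-compare updates by a build-table-then-locate decomposition: a list of per-row free counts, max(counts, default=0), and counts.index(best) for the first tied row.
import Mathlib
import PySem

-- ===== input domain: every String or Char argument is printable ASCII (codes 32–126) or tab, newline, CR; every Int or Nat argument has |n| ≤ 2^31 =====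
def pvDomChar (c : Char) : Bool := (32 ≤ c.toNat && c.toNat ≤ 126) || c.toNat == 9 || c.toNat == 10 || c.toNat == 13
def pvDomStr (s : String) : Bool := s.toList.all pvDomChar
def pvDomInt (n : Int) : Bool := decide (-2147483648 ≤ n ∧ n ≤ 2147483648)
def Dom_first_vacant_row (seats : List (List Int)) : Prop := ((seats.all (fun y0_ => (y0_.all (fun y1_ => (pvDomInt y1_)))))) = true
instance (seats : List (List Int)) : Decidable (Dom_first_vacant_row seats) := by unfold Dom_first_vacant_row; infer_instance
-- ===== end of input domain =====

-- B replaces A's single running-max loop by a table-then-locate decomposition (per-row counts, max, first index); objective: simpler.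


-- ===== PORT A =====
-- A's for-loop over enumerate(seats) as structural recursion over the same state (row index, max_row, max_count)
def fvrLoopA : List (List Int) → Int → Int → Int → Int × Int
  | [], _, max_row, max_count => (max_row, max_count)
  | row :: rest, i, max_row, max_count =>
    let c : Int := (PySem.List.count row (0 : Int) : Int)  -- row.count(0)
    if c > max_count then fvrLoopA rest (i + 1) (i + 1) c
    else fvrLoopA rest (i + 1) max_row max_count

def first_vacant_row (seats : List (List Int)) : Int × Int :=
  fvrLoopA seats 0 0 0

-- ===== PORT B =====
def first_vacant_row_alt (seats : List (List Int)) : Int × Int :=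
  let counts : List Int := seats.map (fun row => (PySem.List.count row (0 : Int) : Int))
  let best : Int := (PySem.List.max? counts (fun y => y)).getD 0   -- max(counts, default=0)
  if best = 0 then (0, 0)
  else (((PySem.List.index? counts best).getD 0 : Int) + 1, best)  -- counts.index(best) never raises: best ∈ counts

-- ===== PRECONDITION & SPEC =====
def Spec_first_vacant_row (seats : List (List Int)) (out : Int × Int) : Prop := out = first_vacant_row_alt seats
instance (seats : List (List Int)) (out : Int × Int) : Decidable (Spec_first_vacant_row seats out) := by unfold Spec_first_vacant_row; infer_instance

-- ===== CLAIM (what is proved, stated in full; the proofs are below) =====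
def Claim_equal_first_vacant_row : Prop := ∀ (seats : List (List Int)), Dom_first_vacant_row seats → Spec_first_vacant_row seats (first_vacant_row seats)

-- ===== LEMMAS AND PROOFS =====

-- A's loop over the precomputed list of per-row counts
def fvrLoopC : List Int → Int → Int → Int → Int × Int
  | [], _, max_row, max_count => (max_row, max_count)
  | c :: rest, i, max_row, max_count =>
    if c > max_count then fvrLoopC rest (i + 1) (i + 1) c
    else fvrLoopC rest (i + 1) max_row max_count

theorem fvrLoopA_eq_loopC (seats : List (List Int)) : ∀ i mr mc,
    fvrLoopA seats i mr mc
      = fvrLoopC (seats.map (fun row => (PySem.List.count row (0 : Int) : Int))) i mr mc := by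
  induction seats with
  | nil => intro i mr mc; rfl
  | cons row rest ih =>
    intro i mr mc
    simp only [fvrLoopA, fvrLoopC, List.map_cons]
    split_ifs <;> exact ih _ _ _

theorem foldl_max_shift (t : List Int) : ∀ a b : Int,
    t.foldl max (max a b) = max a (t.foldl max b) := by
  induction t with
  | nil => intro a b; rfl
  | cons y ys ih =>
    intro a b
    simp only [List.foldl_cons]
    rw [max_assoc, ih]

-- characterisation of A's loop: final count is the running max, final row is 1 + first index of it
theorem fvrLoopC_char (counts : List Int) : ∀ i mr mc,
    fvrLoopC counts i mr mc
      = match PySem.List.max? counts (fun y => y) with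
        | none => (mr, mc)
        | some b =>
          if mc < b then (i + ((PySem.List.index? counts b).getD 0 : Int) + 1, b)
          else (mr, mc) := by
  induction counts with
  | nil => intro i mr mc; rfl
  | cons c cs ih =>
    intro i mr mc
    rw [PySem.List.max?_id_cons]
    simp only [fvrLoopC]
    cases cs with
    | nil =>
      simp only [List.foldl_nil]
      by_cases h : mc < c
      · simp [h, fvrLoopC]
      · simp [h, fvrLoopC]
    | cons d ds =>
      set b' : Int := ds.foldl max d with hb'def
      have hfold : List.foldl max (max c d) ds = max c b' := foldl_max_shift ds c d
      have hb' := PySem.List.max?_id_cons d ds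
      have hb'mem : b' ∈ d :: ds := by
        rcases PySem.List.foldl_max_mem ds d with h | h
        · rw [hb'def, h]; exact List.mem_cons_self
        · exact List.mem_cons_of_mem _ h
      have hidx : ∃ k : Nat, PySem.List.index? (d :: ds) b' = some k := by
        have := PySem.List.index?_isSome_iff (xs := d :: ds) (v := b')
        rcases Option.isSome_iff_exists.mp (this.mpr hb'mem) with ⟨k, hk⟩
        exact ⟨k, hk⟩
      rcases hidx with ⟨k, hk⟩
      rw [List.foldl_cons, hfold]
      by_cases h : mc < c
      · rw [if_pos h, ih, hb']
        dsimp only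
        by_cases h2 : c < b'
        · rw [if_pos h2, max_eq_right (le_of_lt h2), if_pos (lt_trans h h2),
            PySem.List.index?_cons_of_ne _ (ne_of_lt h2), hk]
          simp only [Option.map_some, Option.getD_some, Prod.mk.injEq]
          exact ⟨by push_cast; ring, by simp [hb'def]⟩
        · rw [if_neg h2, max_eq_left (not_lt.mp h2), if_pos h, PySem.List.index?_cons_self]
          simp only [Option.getD_some, Prod.mk.injEq]
          exact ⟨by push_cast; ring, trivial⟩
      · rw [if_neg h, ih, hb']
        dsimp only
        by_cases h2 : mc < b'
        · have hcb' : c < b' := lt_of_le_of_lt (not_lt.mp h) h2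
          rw [if_pos h2, max_eq_right (le_of_lt hcb'), if_pos h2,
            PySem.List.index?_cons_of_ne _ (ne_of_lt hcb'), hk]
          simp only [Option.map_some, Option.getD_some, Prod.mk.injEq]
          exact ⟨by push_cast; ring, by simp [hb'def]⟩
        · have hle : max c b' ≤ mc := max_le (not_lt.mp h) (not_lt.mp h2)
          rw [if_neg h2, if_neg (not_lt.mpr hle)]

theorem counts_nonneg (seats : List (List Int)) :
    ∀ b ∈ seats.map (fun row => (PySem.List.count row (0 : Int) : Int)), 0 ≤ b := by
  intro b hb
  rcases List.mem_map.mp hb with ⟨row, _, rfl⟩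
  exact Int.natCast_nonneg _

-- ===== VERDICT (by name: the statement is the Claim_ definition above) =====
theorem first_vacant_row_spec : Claim_equal_first_vacant_row := by
  intro seats _
  unfold Spec_first_vacant_row first_vacant_row first_vacant_row_alt
  simp only [fvrLoopA_eq_loopC, fvrLoopC_char]
  cases hm : PySem.List.max? (seats.map (fun row => (PySem.List.count row (0 : Int) : Int))) (fun y => y) with
  | none => simp
  | some b =>
    have hb0 : 0 ≤ b := counts_nonneg seats b (PySem.List.max?_mem hm)
    simp only [Option.getD_some]
    by_cases h : b = 0
    · subst h; simp
    · have hpos : 0 < b := lt_of_le_of_ne hb0 (Ne.symm h)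
      rw [if_pos hpos, if_neg h]
      simp only [Prod.mk.injEq]
      exact ⟨by ring, trivial⟩
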